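-- pv_equiv track=rewrite | github.com/baiwan-chenhao/rewrite | leetcode_gen_week1.py | solve
-- ===== SOURCE A (Python) =====
-- from typing import List, Tuple
--
-- def solve(nums: List[int], k: int) -> List[int]:
--     ans = [0] * k
--     f = [0] * k
--     for v in nums:
--         nf = [0] * k
--         nf[v % k] = 1
--         for y, c in enumerate(f):
--             nf[y * v % k] += c
--         f = nf
--         for x, c in enumerate(f):
--             ans[x] += c
--     return ans
-- ===== SOURCE B (Python) =====
-- from typing import List
--
-- def solve(nums: List[int], k: int) -> List[int]:
--     ans = [0] * k
--     n = len(nums)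
--     for i in range(n):
--         p = 1
--         for j in range(i, n):
--             p = p * nums[j] % k
--             ans[p] += 1
--     return ans
-- ===== Notes on version B (the rewrite author's own statement) =====
-- stated objective: simpler
-- what changed: A runs a per-element residue-DP layer f of size k plus a separate ans-accumulation loop (three inner loops per element); B simply enumerates each subarray start and sweeps a running product modulo k, bumping one counter per subarray.
import Mathlib
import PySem

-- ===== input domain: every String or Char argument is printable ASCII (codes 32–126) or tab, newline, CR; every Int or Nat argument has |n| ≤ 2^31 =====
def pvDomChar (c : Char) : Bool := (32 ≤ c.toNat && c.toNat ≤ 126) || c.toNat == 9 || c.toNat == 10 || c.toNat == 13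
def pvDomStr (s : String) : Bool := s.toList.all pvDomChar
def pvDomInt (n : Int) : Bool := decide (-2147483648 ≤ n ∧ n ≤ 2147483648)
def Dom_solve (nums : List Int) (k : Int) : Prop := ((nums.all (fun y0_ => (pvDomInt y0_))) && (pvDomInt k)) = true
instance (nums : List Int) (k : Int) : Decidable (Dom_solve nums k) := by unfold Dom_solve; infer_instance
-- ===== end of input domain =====

-- B replaces A's per-element residue-DP layer (array f plus a separate ans-accumulation loop)
-- by a direct enumeration of subarray starts with a running product mod k; return value only, no mutation visible to callers.

-- ===== PORT A =====
-- 'a[i] += c' on an index known in range (0 ≤ i < k under Pre_): read-then-set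
def pvAddAt (a : List Int) (i : Nat) (c : Int) : List Int := a.set i (a.getD i 0 + c)

-- the body of A's 'for v in nums' loop, acting on the state (ans, f)
def pvStepA (k : Int) (st : List Int × List Int) (v : Int) : List Int × List Int :=
  let nf0 := (List.replicate k.toNat (0 : Int)).set (PySem.Int.mod v k).toNat 1
  let nf := (PySem.List.enumerate st.2 0).foldl
      (fun b p => pvAddAt b (PySem.Int.mod (p.1 * v) k).toNat p.2) nf0
  let ans := (PySem.List.enumerate nf 0).foldl (fun b p => pvAddAt b p.1.toNat p.2) st.1
  (ans, nf)

def solve (nums : List Int) (k : Int) : List Int :=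
  (nums.foldl (pvStepA k) (List.replicate k.toNat 0, List.replicate k.toNat 0)).1

-- ===== PORT B =====
def solve_alt (nums : List Int) (k : Int) : List Int :=
  let n : Int := nums.length
  (PySem.List.pyRange 0 n 1).foldl
    (fun ans i =>
      ((PySem.List.pyRange i n 1).foldl
          (fun (st : List Int × Int) j =>
            let p := PySem.Int.mod (st.2 * PySem.List.pyGetD nums j 0) k
            (pvAddAt st.1 p.toNat 1, p))
          (ans, 1)).1)
    (List.replicate k.toNat 0)

-- ===== PRECONDITION & SPEC =====
-- Pre_ excludes exactly the inputs where A raises (nums ≠ [] with k ≤ 0: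
-- ZeroDivisionError for k = 0, IndexError for k < 0); B raises there as well.
def Pre_solve (nums : List Int) (k : Int) : Prop := nums = [] ∨ 1 ≤ k
instance (nums : List Int) (k : Int) : Decidable (Pre_solve nums k) := by unfold Pre_solve; infer_instance
def pvWitness_solve : List Int × Int := ([1, 2, 3], 4)

def Spec_solve (nums : List Int) (k : Int) (out : List Int) : Prop := out = solve_alt nums k
instance (nums : List Int) (k : Int) (out : List Int) : Decidable (Spec_solve nums k out) := by unfold Spec_solve; infer_instance

-- ===== CLAIM (what is proved, stated in full; the proofs are below) =====
def Claim_equal_solve : Prop := ∀ (nums : List Int) (k : Int), Dom_solve nums k → Pre_solve nums k → Spec_solve nums k (solve nums k)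

-- ===== LEMMAS AND PROOFS =====

-- residue of x mod k as an array index
def resk (k x : Int) : Nat := (PySem.Int.mod x k).toNat
-- the k-entry zero table
def Zt (k : Int) : List Int := List.replicate k.toNat (0 : Int)
-- one unit bump, and a sequence of unit bumps
def bump (a : List Int) (r : Nat) : List Int := pvAddAt a r 1
def bumps (a : List Int) (L : List Nat) : List Int := L.foldl bump a
-- the counts table of an event list
def cnts (k : Int) (L : List Nat) : List Int := bumps (Zt k) L
-- events emitted by B's inner loop from running residue p over the list l, and the final residue
def rowEv (k p : Int) : List Int → List Nat
  | [] => []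
  | v :: t => resk k (p * v) :: rowEv k (PySem.Int.mod (p * v) k) t
def rowEnd (k p : Int) : List Int → Int
  | [] => p
  | v :: t => rowEnd k (PySem.Int.mod (p * v) k) t
-- residues of the products of all nonempty suffixes of q (indexed by start position)
def LRes (k : Int) (q : List Int) : List Nat :=
  (List.range q.length).map (fun i => resk k ((q.drop i).prod))
-- B's result in bump form
def altCore (k : Int) (q : List Int) : List Int :=
  (List.range q.length).foldl (fun a i => bumps a (rowEv k 1 (q.drop i))) (Zt k)

theorem pv_length_pvAddAt (a : List Int) (i : Nat) (c : Int) : (pvAddAt a i c).length = a.length := by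
  simp [pvAddAt]

theorem pv_getD_pvAddAt (a : List Int) (i : Nat) (c : Int) (r : Nat) (h : i < a.length) :
    (pvAddAt a i c).getD r 0 = a.getD r 0 + if r = i then c else 0 := by
  by_cases hr : r = i
  · subst hr; simp [pvAddAt, List.getD, h]
  · simp [pvAddAt, List.getD, hr, show i ≠ r from fun he => hr he.symm]


theorem pv_getD_Zt (k : Int) (r : Nat) : (Zt k).getD r 0 = 0 := by
  simp only [Zt, List.getD, List.getElem?_replicate]
  split <;> rfl


theorem pv_length_Zt (k : Int) : (Zt k).length = k.toNat := by simp [Zt]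

theorem pv_length_bumps (L : List Nat) (a : List Int) : (bumps a L).length = a.length := by
  induction L generalizing a with
  | nil => rfl
  | cons e t ih => simp [bumps, List.foldl_cons] at ih ⊢; rw [ih, bump, pv_length_pvAddAt]


theorem pv_getD_bumps (L : List Nat) (a : List Int) (r : Nat) (hL : ∀ e ∈ L, e < a.length) :
    (bumps a L).getD r 0 = a.getD r 0 + (L.count r : Int) := by
  induction L generalizing a with
  | nil => simp [bumps]
  | cons e t ih =>
    have he : e < a.length := hL e (by simp)
    have : (bumps (bump a e) t).getD r 0 = (bump a e).getD r 0 + (t.count r : Int) := by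
      apply ih
      intro x hx
      rw [bump, pv_length_pvAddAt]; exact hL x (by simp [hx])
    simp only [bumps, List.foldl_cons] at *
    rw [this, bump, pv_getD_pvAddAt _ _ _ _ he, List.count_cons]
    by_cases hre : e = r
    · subst hre; simp; ring
    · simp [hre, show r ≠ e from fun h => hre h.symm]


theorem pv_bumps_append (a : List Int) (L1 L2 : List Nat) :
    bumps a (L1 ++ L2) = bumps (bumps a L1) L2 := by
  simp [bumps, List.foldl_append]

-- two event lists with the same counts produce the same table
theorem pv_bumps_congr (a : List Int) (L1 L2 : List Nat)
    (h1 : ∀ e ∈ L1, e < a.length) (h2 : ∀ e ∈ L2, e < a.length)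
    (hc : ∀ r, L1.count r = L2.count r) : bumps a L1 = bumps a L2 := by
  apply List.ext_getElem
  · rw [pv_length_bumps, pv_length_bumps]
  · intro i h1' h2'
    have hi : i < a.length := by rwa [pv_length_bumps] at h1'
    have g1 := pv_getD_bumps L1 a i h1
    have g2 := pv_getD_bumps L2 a i h2
    rw [List.getD_eq_getElem _ _ h1'] at g1
    rw [List.getD_eq_getElem _ _ h2'] at g2
    rw [g1, g2, hc i]


theorem pv_resk_lt (k : Int) (hk : 1 ≤ k) (x : Int) : resk k x < k.toNat := by
  have h1 := PySem.Int.mod_nonneg x (by omega : (0:Int) < k)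
  have h2 := PySem.Int.mod_lt x (by omega : (0:Int) < k)
  unfold resk; omega


theorem pv_resk_cast (k : Int) (hk : 1 ≤ k) (x : Int) : ((resk k x : Nat) : Int) = PySem.Int.mod x k := by
  have h1 := PySem.Int.mod_nonneg x (by omega : (0:Int) < k)
  unfold resk; omega


theorem pv_mod_mul_left (k : Int) (hk : 1 ≤ k) (a b : Int) :
    PySem.Int.mod (PySem.Int.mod a k * b) k = PySem.Int.mod (a * b) k := by
  have hk' : (0:Int) < k := by omega
  simp only [PySem.Int.mod_eq_emod_of_pos hk']
  conv_rhs => rw [Int.mul_emod]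
  rw [Int.mul_emod, Int.emod_emod_of_dvd]
  exact dvd_refl k


-- ===== A-side loop characterisations =====

theorem pv_wfold_length (g : Int → Nat) (f : List Int) (s : Int) (a : List Int) :
    (((PySem.List.enumerate f s).foldl (fun b p => pvAddAt b (g p.1) p.2) a)).length = a.length := by
  induction f generalizing s a with
  | nil => simp [PySem.List.enumerate_nil]
  | cons x t ih =>
    rw [PySem.List.enumerate_cons]
    simp only [List.foldl_cons]
    rw [ih, pv_length_pvAddAt]


theorem pv_wfold_getD (g : Int → Nat) (f : List Int) (s : Int) (a : List Int) (r : Nat)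
    (hg : ∀ p ∈ PySem.List.enumerate f s, g p.1 < a.length) :
    (((PySem.List.enumerate f s).foldl (fun b p => pvAddAt b (g p.1) p.2) a)).getD r 0
      = a.getD r 0 + ((PySem.List.enumerate f s).map (fun p => if g p.1 = r then p.2 else 0)).sum := by
  induction f generalizing s a with
  | nil => simp [PySem.List.enumerate_nil]
  | cons x t ih =>
    rw [PySem.List.enumerate_cons] at hg ⊢
    simp only [List.foldl_cons, List.map_cons, List.sum_cons]
    have hgs : g s < a.length := by
      have := hg (s, x) (by simp); simpa using this
    have hrest : ∀ p ∈ PySem.List.enumerate t (s + 1), g p.1 < (pvAddAt a (g s) x).length := by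
      intro p hp; rw [pv_length_pvAddAt]; exact hg p (by simp [hp])
    rw [ih (s + 1) (pvAddAt a (g s) x) hrest, pv_getD_pvAddAt a (g s) x r hgs]
    have hsw : (if r = g s then x else 0) = (if g s = r then x else 0) := by
      by_cases h : g s = r
      · simp [h]
      · rw [if_neg h, if_neg (fun hh : r = g s => h hh.symm)]
    rw [hsw]; ring


theorem pv_enum_map_sum (F : Int → Int → Int) (f : List Int) (s : Int) :
    ((PySem.List.enumerate f s).map (fun p => F p.1 p.2)).sum
      = ∑ i ∈ Finset.range f.length, F (s + i) (f.getD i 0) := by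
  induction f generalizing s with
  | nil => simp [PySem.List.enumerate_nil]
  | cons x t ih =>
    rw [PySem.List.enumerate_cons]
    simp only [List.map_cons, List.sum_cons, List.length_cons]
    rw [Finset.sum_range_succ', ih (s + 1)]
    have h2 : ∀ i : Nat, F (s + (((i : Nat) + 1 : Nat) : Int)) ((x :: t).getD (i + 1) 0)
        = F (s + 1 + (i : Int)) (t.getD i 0) := by
      intro i
      have : s + (((i : Nat) + 1 : Nat) : Int) = s + 1 + (i : Int) := by push_cast; ring
      rw [this, List.getD_cons_succ]
    simp only [h2]
    have h0 : F (s + ((0 : Nat) : Int)) ((x :: t).getD 0 0) = F s x := by norm_num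
    rw [h0]
    ring


-- selecting entry r of a table by the identity relabel
theorem pv_sel_sum (f : List Int) (r : Nat) :
    (∑ i ∈ Finset.range f.length, (if ((0 : Int) + i).toNat = r then f.getD i 0 else 0))
      = if r < f.length then f.getD r 0 else 0 := by
  have h1 : ∀ i : Nat, ((0 : Int) + (i : Int)).toNat = i := by intro i; simp
  simp only [h1]
  rw [Finset.sum_ite_eq' (Finset.range f.length) r (fun i => f.getD i 0)]
  simp [Finset.mem_range]


-- pushing a counts table through a relabelling g
theorem pv_relabel_sum (k : Int) (_hk : 1 ≤ k) (g : Nat → Nat) (L : List Nat) (r : Nat)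
    (hL : ∀ e ∈ L, e < k.toNat) :
    (∑ i ∈ Finset.range k.toNat, (if g i = r then (L.count i : Int) else 0))
      = ((L.map g).count r : Int) := by
  induction L with
  | nil => simp
  | cons e t ih =>
    have het : e < k.toNat := hL e (by simp)
    have iht := ih (fun x hx => hL x (by simp [hx]))
    have hsplit : ∀ i : Nat, (if g i = r then (((e :: t).count i : Nat) : Int) else 0)
        = (if g i = r then ((t.count i : Nat) : Int) else 0)
          + (if i = e then (if g i = r then 1 else 0) else 0) := by
      intro i
      rw [List.count_cons]
      by_cases h1 : g i = r <;> by_cases h2 : i = e <;>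
        simp [h1, h2, beq_iff_eq] <;> omega
    simp only [hsplit]
    rw [Finset.sum_add_distrib, iht,
        Finset.sum_ite_eq' (Finset.range k.toNat) e (fun i => if g i = r then (1 : Int) else 0)]
    simp only [Finset.mem_range, het, if_true, List.map_cons, List.count_cons]
    by_cases h : g e = r
    · simp [h]
    · simp [h]


theorem pv_count_map_eq_sum {α : Type} (l : List α) (g : α → Nat) (r : Nat) :
    ((l.map g).count r) = (l.map (fun x => if g x = r then 1 else 0)).sum := by
  induction l with
  | nil => simp
  | cons x t ih =>
    simp only [List.map_cons, List.count_cons, List.sum_cons, ih, beq_iff_eq]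
    by_cases h : g x = r <;> simp [h] <;> omega


theorem pv_count_flatMap {α : Type} (l : List α) (g : α → List Nat) (r : Nat) :
    ((l.flatMap g).count r) = (l.map (fun x => (g x).count r)).sum := by
  induction l with
  | nil => simp
  | cons x t ih => simp [List.flatMap_cons, List.count_append, ih]


-- ===== row lemmas =====

theorem pv_rowEv_append (k : Int) (l : List Int) (p v : Int) :
    rowEv k p (l ++ [v]) = rowEv k p l ++ [resk k (rowEnd k p l * v)] := by
  induction l generalizing p with
  | nil => simp [rowEv, rowEnd]
  | cons w t ih => simp [rowEv, rowEnd, ih]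


theorem pv_rowEnd_prod (k : Int) (hk : 1 ≤ k) (l : List Int) (p : Int) (hl : l ≠ []) :
    rowEnd k p l = PySem.Int.mod (p * l.prod) k := by
  induction l generalizing p with
  | nil => exact absurd rfl hl
  | cons v t ih =>
    cases t with
    | nil => simp [rowEnd, List.prod_cons, List.prod_nil, mul_one]
    | cons w t2 =>
      show rowEnd k (PySem.Int.mod (p * v) k) (w :: t2) = _
      rw [ih (PySem.Int.mod (p * v) k) (by simp), pv_mod_mul_left k hk]
      simp only [List.prod_cons]
      ring_nf


theorem pv_rowEv_lt (k : Int) (hk : 1 ≤ k) (l : List Int) (p : Int) :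
    ∀ e ∈ rowEv k p l, e < k.toNat := by
  induction l generalizing p with
  | nil => simp [rowEv]
  | cons v t ih =>
    intro e he
    rw [rowEv] at he
    rcases List.mem_cons.mp he with h | h
    · subst h; exact pv_resk_lt k hk _
    · exact ih _ e h


theorem pv_LRes_lt (k : Int) (hk : 1 ≤ k) (q : List Int) : ∀ e ∈ LRes k q, e < k.toNat := by
  intro e he
  simp only [LRes, List.mem_map] at he
  obtain ⟨i, _, hi⟩ := he
  subst hi
  exact pv_resk_lt k hk _


theorem pv_LRes_append (k : Int) (hk : 1 ≤ k) (q : List Int) (v : Int) :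
    LRes k (q ++ [v]) = (LRes k q).map (fun y : Nat => resk k ((y : Int) * v)) ++ [resk k v] := by
  simp only [LRes, List.length_append, List.length_singleton, List.range_succ,
    List.map_append, List.map_map]
  congr 1
  · apply List.map_congr_left
    intro i hi
    have hin : i ≤ q.length := le_of_lt (List.mem_range.mp hi)
    simp only [Function.comp]
    rw [List.drop_append_of_le_length hin, List.prod_append, List.prod_singleton]
    rw [pv_resk_cast k hk]
    simp only [resk]
    rw [pv_mod_mul_left k hk]
  · simp


-- ===== B-side shape =====

theorem pv_inner_loop (k : Int) (l : List Int) (a : List Int) (p : Int) :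
    (l.foldl (fun (st : List Int × Int) v =>
        (pvAddAt st.1 (PySem.Int.mod (st.2 * v) k).toNat 1, PySem.Int.mod (st.2 * v) k)) (a, p))
      = (bumps a (rowEv k p l), rowEnd k p l) := by
  induction l generalizing a p with
  | nil => simp [rowEv, rowEnd, bumps]
  | cons v t ih => simp [rowEv, rowEnd, bumps, List.foldl_cons, ih, bump, resk]


theorem pv_alt_shape (nums : List Int) (k : Int) : solve_alt nums k = altCore k nums := by
  show (PySem.List.pyRange 0 (nums.length : Int) 1).foldl _ (List.replicate k.toNat 0) = _
  have hstep : ∀ (a : List Int) (i : Int), i ∈ PySem.List.pyRange 0 (nums.length : Int) 1 →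
      ((PySem.List.pyRange i (nums.length : Int) 1).foldl
          (fun (st : List Int × Int) j =>
            let p := PySem.Int.mod (st.2 * PySem.List.pyGetD nums j 0) k
            (pvAddAt st.1 p.toNat 1, p))
          (a, 1)).1
        = bumps a (rowEv k 1 (nums.drop i.toNat)) := by
    intro a i hi
    have h0 : 0 ≤ i := (PySem.List.mem_pyRange_one.mp hi).1
    rw [PySem.List.foldl_pyRange_pyGetD' (xs := nums) (d := 0)
        (f := fun (st : List Int × Int) v =>
          (pvAddAt st.1 (PySem.Int.mod (st.2 * v) k).toNat 1, PySem.Int.mod (st.2 * v) k))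
        (init := (a, 1)) h0]
    rw [pv_inner_loop]
  have h1 : (PySem.List.pyRange 0 (nums.length : Int) 1).foldl
      (fun ans i =>
        ((PySem.List.pyRange i (nums.length : Int) 1).foldl
            (fun (st : List Int × Int) j =>
              let p := PySem.Int.mod (st.2 * PySem.List.pyGetD nums j 0) k
              (pvAddAt st.1 p.toNat 1, p))
            (ans, 1)).1)
      (List.replicate k.toNat 0)
      = (PySem.List.pyRange 0 (nums.length : Int) 1).foldl
          (fun a i => bumps a (rowEv k 1 (nums.drop i.toNat))) (List.replicate k.toNat 0) :=
    PySem.List.foldl_congr_mem _ _ _ _ hstep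
  rw [h1, PySem.List.pyRange_one, List.foldl_map]
  simp only [Int.sub_zero, Int.toNat_natCast, zero_add]
  rfl


theorem pv_fold_bumps_flatMap {α : Type} (l : List α) (g : α → List Nat) (a : List Int) :
    l.foldl (fun b x => bumps b (g x)) a = bumps a (l.flatMap g) := by
  induction l generalizing a with
  | nil => simp [bumps]
  | cons x t ih => simp [List.flatMap_cons, pv_bumps_append, ih]


theorem pv_altCore_eq (k : Int) (q : List Int) :
    altCore k q = bumps (Zt k) ((List.range q.length).flatMap (fun i => rowEv k 1 (q.drop i))) := by
  rw [altCore, pv_fold_bumps_flatMap]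

theorem pv_length_altCore (k : Int) (q : List Int) : (altCore k q).length = k.toNat := by
  rw [pv_altCore_eq, pv_length_bumps, pv_length_Zt]

theorem pv_cnts_length (k : Int) (L : List Nat) : (cnts k L).length = k.toNat := by
  rw [cnts, pv_length_bumps, pv_length_Zt]

theorem pv_cnts_getD (k : Int) (L : List Nat) (r : Nat) (hL : ∀ e ∈ L, e < k.toNat) :
    (cnts k L).getD r 0 = (L.count r : Int) := by
  rw [cnts, pv_getD_bumps _ _ _ (by simpa [pv_length_Zt] using hL), pv_getD_Zt, zero_add]

theorem pv_stepA_nf (k : Int) (hk : 1 ≤ k) (L : List Nat) (hL : ∀ e ∈ L, e < k.toNat) (v : Int) :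
    (PySem.List.enumerate (cnts k L) 0).foldl
        (fun b p => pvAddAt b (PySem.Int.mod (p.1 * v) k).toNat p.2)
        ((List.replicate k.toNat (0 : Int)).set (PySem.Int.mod v k).toNat 1)
      = cnts k ((L.map (fun y : Nat => resk k ((y : Int) * v))) ++ [resk k v]) := by
  have hnf0 : (List.replicate k.toNat (0 : Int)).set (PySem.Int.mod v k).toNat 1
      = bump (Zt k) (resk k v) := by
    rw [bump, pvAddAt, pv_getD_Zt, zero_add]
    rfl
  rw [hnf0]
  have hlen0 : (bump (Zt k) (resk k v)).length = k.toNat := by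
    rw [bump, pv_length_pvAddAt, pv_length_Zt]
  have hnew : ∀ e ∈ (L.map (fun y : Nat => resk k ((y : Int) * v))) ++ [resk k v], e < k.toNat := by
    intro e he
    rcases List.mem_append.mp he with h | h
    · rcases List.mem_map.mp h with ⟨y, _, hy⟩
      subst hy; exact pv_resk_lt k hk _
    · rcases List.mem_singleton.mp h with rfl
      exact pv_resk_lt k hk _
  apply List.ext_getElem
  · rw [pv_wfold_length (fun y => (PySem.Int.mod (y * v) k).toNat), hlen0, pv_cnts_length]
  · intro r h1 h2
    rw [← List.getD_eq_getElem _ 0 h1, ← List.getD_eq_getElem _ 0 h2]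
    rw [pv_wfold_getD (fun y => (PySem.Int.mod (y * v) k).toNat) _ _ _ _
        (by intro p _; rw [hlen0]; exact pv_resk_lt k hk _)]
    rw [pv_enum_map_sum (fun y c => if (PySem.Int.mod (y * v) k).toNat = r then c else 0)]
    have hterm : ∀ i : Nat, i ∈ Finset.range (cnts k L).length →
        (if (PySem.Int.mod (((0 : Int) + (i : Int)) * v) k).toNat = r then (cnts k L).getD i 0 else 0)
          = (if (fun y : Nat => resk k ((y : Int) * v)) i = r then ((L.count i : Nat) : Int) else 0) := by
      intro i _
      rw [zero_add, pv_cnts_getD k L i hL]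
      rfl
    rw [Finset.sum_congr rfl hterm, pv_cnts_length,
        pv_relabel_sum k hk (fun y : Nat => resk k ((y : Int) * v)) L r hL]
    rw [pv_cnts_getD k _ r hnew, List.count_append]
    rw [bump, pv_getD_pvAddAt _ _ _ _ (by rw [pv_length_Zt]; exact pv_resk_lt k hk _), pv_getD_Zt,
        zero_add]
    have : ([resk k v].count r) = if r = resk k v then 1 else 0 := by
      by_cases h : r = resk k v <;> simp [List.count_singleton, beq_iff_eq, h] <;> omega
    rw [this]
    push_cast
    ring

theorem pv_stepA_ans (k : Int) (_hk : 1 ≤ k) (a : List Int) (ha : a.length = k.toNat)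
    (M : List Nat) (hM : ∀ e ∈ M, e < k.toNat) :
    (PySem.List.enumerate (cnts k M) 0).foldl (fun b p => pvAddAt b p.1.toNat p.2) a
      = bumps a M := by
  apply List.ext_getElem
  · rw [pv_wfold_length (fun y => y.toNat), pv_length_bumps]
  · intro r h1 h2
    rw [← List.getD_eq_getElem _ 0 h1, ← List.getD_eq_getElem _ 0 h2]
    have hr : r < a.length := by rwa [pv_wfold_length (fun y => y.toNat)] at h1
    rw [pv_wfold_getD (fun y => y.toNat) _ _ _ _ ?hg]
    case hg =>
      intro p hp
      rcases (PySem.List.mem_enumerate_iff _ _ _).mp hp with ⟨j, hj, hpj⟩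
      subst hpj
      simp only [zero_add, Int.toNat_natCast]
      rw [ha]
      rw [pv_cnts_length] at hj
      exact hj
    rw [pv_enum_map_sum (fun y c => if y.toNat = r then c else 0), pv_sel_sum]
    rw [pv_getD_bumps _ _ _ (by rw [ha]; exact hM)]
    have hrk : r < (cnts k M).length := by rw [pv_cnts_length, ← ha]; exact hr
    rw [if_pos hrk, pv_cnts_getD k M r hM]

theorem pv_altCore_append (k : Int) (hk : 1 ≤ k) (p : List Int) (v : Int) :
    altCore k (p ++ [v]) = bumps (altCore k p) (LRes k (p ++ [v])) := by
  rw [pv_altCore_eq, pv_altCore_eq, ← pv_bumps_append]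
  apply pv_bumps_congr
  · intro e he
    rw [pv_length_Zt]
    rcases List.mem_flatMap.mp he with ⟨i, _, hei⟩
    exact pv_rowEv_lt k hk _ _ e hei
  · intro e he
    rw [pv_length_Zt]
    rcases List.mem_append.mp he with h | h
    · rcases List.mem_flatMap.mp h with ⟨i, _, hei⟩
      exact pv_rowEv_lt k hk _ _ e hei
    · exact pv_LRes_lt k hk _ e h
  · intro r
    rw [pv_count_flatMap, List.count_append, pv_count_flatMap]
    have hn : (p ++ [v]).length = p.length + 1 := by simp
    rw [hn, List.range_succ, List.map_append, List.sum_append]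
    have hlast : (p ++ [v]).drop p.length = [v] := by
      rw [List.drop_append_of_le_length le_rfl, List.drop_length, List.nil_append]
    have hrow : ∀ i ∈ List.range p.length,
        (rowEv k 1 ((p ++ [v]).drop i)).count r
          = (rowEv k 1 (p.drop i)).count r
            + (if resk k ((p.drop i).prod * v) = r then 1 else 0) := by
      intro i hi
      have hilt : i < p.length := List.mem_range.mp hi
      have hne : p.drop i ≠ [] := by
        intro h
        have := List.drop_eq_nil_iff.mp h
        omega
      rw [List.drop_append_of_le_length (le_of_lt hilt), pv_rowEv_append, List.count_append]
      congr 1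
      rw [pv_rowEnd_prod k hk _ _ hne, one_mul]
      simp only [resk, pv_mod_mul_left k hk]
      by_cases h : (PySem.Int.mod ((p.drop i).prod * v) k).toNat = r <;>
        simp [h]
    rw [List.map_congr_left hrow, List.sum_map_add]
    rw [pv_LRes_append k hk, List.count_append]
    have hmap : (LRes k p).map (fun y : Nat => resk k ((y : Int) * v))
        = (List.range p.length).map (fun i => resk k ((p.drop i).prod * v)) := by
      rw [LRes, List.map_map]
      apply List.map_congr_left
      intro i _
      simp only [Function.comp]
      rw [pv_resk_cast k hk]
      simp only [resk]
      rw [pv_mod_mul_left k hk]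
    rw [hmap, pv_count_map_eq_sum]
    simp only [List.map_cons, List.map_nil, List.sum_cons, List.sum_nil, add_zero]
    rw [hlast]
    simp only [rowEv, one_mul, List.count_cons, List.count_nil]
    have h1 : ([] : List Nat).count r = 0 := rfl
    by_cases h : resk k v = r <;> simp [h, beq_iff_eq] <;> omega


-- ===== main induction =====

theorem pv_main (k : Int) (hk : 1 ≤ k) (p : List Int) :
    p.foldl (pvStepA k) (Zt k, Zt k) = (altCore k p, cnts k (LRes k p)) := by
  induction p using List.reverseRecOn with
  | nil => simp [altCore, LRes, cnts, bumps]
  | append_singleton p v ih =>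
    rw [List.foldl_append, List.foldl_cons, List.foldl_nil, ih]
    have hnf := pv_stepA_nf k hk (LRes k p) (pv_LRes_lt k hk p) v
    rw [← pv_LRes_append k hk] at hnf
    have hans := pv_stepA_ans k hk (altCore k p) (pv_length_altCore k p)
      (LRes k (p ++ [v])) (pv_LRes_lt k hk _)
    simp only [pvStepA]
    rw [hnf, hans, pv_altCore_append k hk]


-- ===== VERDICT (by name: the statement is the Claim_ definition above) =====
theorem solve_spec : Claim_equal_solve := by
  intro nums k _ hpre
  show solve nums k = solve_alt nums k
  rcases hpre with h | hk
  · subst h; rfl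
  · rw [pv_alt_shape]
    show (nums.foldl (pvStepA k) (Zt k, Zt k)).1 = altCore k nums
    rw [pv_main k hk]
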